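-- pv_equiv track=rewrite | github.com/paulinacwielag/studia_us | jupyter/Podstawy programowania 2020/Prace domowe semestr 2/PD05 semestr drugi/numseq.py | czy_krecony_palindrom
-- ===== SOURCE A (Python) =====
-- def dlugosc(L):
--     'zwraca dlugość ciągu L'
--
--     dlugosc = 0
--     for element in L:
--         dlugosc += 1
--
--     return dlugosc
--
-- def odwroc(L):
--     'zwraca kopię ciągu L, ale w kolejności odwrotnej do oryginału'
--
--     odwrocone_L = L[::-1]
--
--     return odwrocone_L
--
-- def czy_palindrom(L):
--     'zwracająca True gry lista L jest palindromem lub False gry nie jest'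
--     odwrocona = odwroc(L)
--     if odwrocona == L:
--         return True
--     else:
--         return False
--
-- def czy_krecony_palindrom(L):
--     '''
--     funkcja sprawdza
--
--     >>> czy_krecony_palindrom([1, 2, 1])
--     True
--     >>> czy_krecony_palindrom([2, 1, 1])
--     True
--     >>> czy_krecony_palindrom([1, 2, 3])
--     False
--     '''
--
--     lista = L
--     powtorzenia = dlugosc(L)
--     for powtorzenie in range(powtorzenia):
--         ostatni_element = lista[-1]
--         kopia_listy = lista[:-1]
--         kopia_listy.insert(0, ostatni_element)
--         lista = kopia_listy
--         if czy_palindrom(lista):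
--             return True
--     return False
-- ===== SOURCE B (Python) =====
-- def czy_krecony_palindrom(L):
--     n = len(L)
--     counts = {}
--     for x in L:
--         counts[x] = counts.get(x, 0) + 1
--     odd = 0
--     for c in counts.values():
--         if c % 2 == 1:
--             odd += 1
--     if odd > 1:
--         return False
--     D = L + L
--     for i in range(n):
--         r = D[i:i+n]
--         if r == r[::-1]:
--             return True
--     return False
-- ===== Notes on version B (the rewrite author's own statement) =====
-- stated objective: faster
-- what changed: B first rejects in one counting pass when more than one value has odd multiplicity (no rotation of such a list can be a palindrome), then scans length-n windows of the doubled list L+L instead of repeatedly rebuilding the rotated list by moving the last element to the front.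
import Mathlib
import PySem

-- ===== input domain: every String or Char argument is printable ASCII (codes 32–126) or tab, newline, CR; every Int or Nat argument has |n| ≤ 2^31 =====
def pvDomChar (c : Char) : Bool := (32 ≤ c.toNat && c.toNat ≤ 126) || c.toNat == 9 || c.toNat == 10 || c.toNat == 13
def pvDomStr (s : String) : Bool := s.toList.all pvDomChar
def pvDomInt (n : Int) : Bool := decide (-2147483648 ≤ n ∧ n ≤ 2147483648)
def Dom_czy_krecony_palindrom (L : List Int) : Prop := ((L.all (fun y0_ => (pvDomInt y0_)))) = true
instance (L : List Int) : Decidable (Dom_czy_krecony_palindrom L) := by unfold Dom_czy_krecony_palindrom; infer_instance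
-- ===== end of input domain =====

-- B rejects early when more than one value occurs an odd number of times, then checks
-- length-n windows of L ++ L, instead of A's repeated move-last-to-front rotation scan.


-- ===== PORT A =====
def dlugosc (L : List Int) : Int := L.foldl (fun d _ => d + 1) 0

def odwroc (L : List Int) : List Int := (PySem.List.slice? L none none (-1)).getD []

def czy_palindrom (L : List Int) : Bool := odwroc L == L

-- the for-loop of A, fuel = number of remaining iterations of range(powtorzenia);
-- pyGet? lista (-1) is none only on an empty lista, which the loop never reaches
def aLoop (lista : List Int) : Nat → Bool
  | 0 => false
  | k + 1 =>
    match PySem.List.pyGet? lista (-1) with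
    | none => false
    | some ostatni =>
      let kopia := PySem.List.insert (PySem.List.slice lista none (some (-1))) 0 ostatni
      if czy_palindrom kopia then true else aLoop kopia k

def czy_krecony_palindrom (L : List Int) : Bool := aLoop L (dlugosc L).toNat

-- ===== PORT B =====
def czy_krecony_palindrom_alt (L : List Int) : Bool :=
  let n : Int := L.length
  let counts := L.foldl (fun d x => d.insert x (d.getD x 0 + 1)) (PySem.Dict.empty (κ := Int) (ν := Int))
  let odd : Int := counts.values.foldl (fun o c => if PySem.Int.mod c 2 == 1 then o + 1 else o) 0
  if odd > 1 then false
  else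
    let D := L ++ L
    (PySem.List.pyRange 0 n 1).any (fun i =>
      let r := PySem.List.slice D (some i) (some (i + n))
      r == (PySem.List.slice? r none none (-1)).getD [])

-- ===== PRECONDITION & SPEC =====
def Spec_czy_krecony_palindrom (L : List Int) (out : Bool) : Prop := out = czy_krecony_palindrom_alt L
instance (L : List Int) (out : Bool) : Decidable (Spec_czy_krecony_palindrom L out) := by unfold Spec_czy_krecony_palindrom; infer_instance

-- ===== CLAIM (what is proved, stated in full; the proofs are below) =====
def Claim_equal_czy_krecony_palindrom : Prop := ∀ (L : List Int), Dom_czy_krecony_palindrom L → Spec_czy_krecony_palindrom L (czy_krecony_palindrom L)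

-- ===== LEMMAS AND PROOFS =====

-- right rotation by one: what A's loop body produces from a nonempty list
def rrot (l : List Int) : List Int := l.rotate (l.length - 1)

-- number of distinct values occurring an odd number of times
def oddCount (L : List Int) : Nat :=
  (PySem.Set.ofList L).countP (fun k => decide (L.count k % 2 = 1))

lemma dlugosc_eq (L : List Int) : dlugosc L = (L.length : Int) := by
  have h : ∀ (M : List Int) (c : Int), M.foldl (fun d _ => d + 1) c = c + M.length := by
    intro M
    induction M with
    | nil => simp
    | cons a t ih => intro c; simp [List.foldl_cons, ih]; ring
  simpa using h L 0

lemma pyGet_last (xs : List Int) (h : xs ≠ []) :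
    PySem.List.pyGet? xs (-1) = some (xs.getLast h) := by
  have hlen : 1 ≤ xs.length := List.length_pos_of_ne_nil h
  simp [PySem.List.pyGet?, PySem.List.pyIdx?, hlen]
  rw [List.getElem?_eq_getElem (by omega)]
  simp [List.getLast_eq_getElem]

lemma rrot_step (l : List Int) (h : l ≠ []) : rrot l = l.getLast h :: l.dropLast := by
  have hlen : 1 ≤ l.length := List.length_pos_of_ne_nil h
  have hd : l.drop (l.length - 1) = [l.getLast h] := by
    rw [List.drop_eq_getElem_cons (by omega), List.drop_eq_nil_of_le (by omega)]
    simp [List.getLast_eq_getElem]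
  rw [rrot, List.rotate_eq_drop_append_take (by omega), hd, List.dropLast_eq_take]
  rfl

lemma rrot_length (l : List Int) : (rrot l).length = l.length := by
  simp [rrot]

lemma czy_palindrom_iff (l : List Int) : czy_palindrom l = true ↔ l.reverse = l := by
  simp [czy_palindrom, odwroc, PySem.List.slice?_none_none_neg_one]

lemma aLoop_iff (k : Nat) : ∀ l : List Int, l ≠ [] →
    (aLoop l k = true ↔ ∃ m, 1 ≤ m ∧ m ≤ k ∧ (rrot^[m] l).reverse = rrot^[m] l) := by
  induction k with
  | zero =>
    intro l _
    refine ⟨fun h => by simp [aLoop] at h, ?_⟩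
    rintro ⟨m, h1, h2, _⟩; omega
  | succ k ih =>
    intro l hl
    have hstep : aLoop l (k + 1) =
        if czy_palindrom (rrot l) then true else aLoop (rrot l) k := by
      rw [aLoop, pyGet_last l hl]
      simp only [PySem.List.slice_to_neg_one, PySem.List.insert_zero]
      rw [← rrot_step l hl]
    have hne : rrot l ≠ [] := by
      intro hc
      have := rrot_length l
      rw [hc] at this
      exact hl (List.eq_nil_of_length_eq_zero this.symm)
    rw [hstep]
    constructor
    · intro h
      by_cases hp : czy_palindrom (rrot l) = true
      · exact ⟨1, le_refl 1, by omega, by simpa [czy_palindrom_iff] using hp⟩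
      · rw [if_neg hp] at h
        obtain ⟨m, h1, h2, h3⟩ := (ih (rrot l) hne).mp h
        exact ⟨m + 1, by omega, by omega, by simpa [Function.iterate_succ_apply] using h3⟩
    · rintro ⟨m, h1, h2, h3⟩
      by_cases hp : czy_palindrom (rrot l) = true
      · simp [hp]
      · rw [if_neg hp]
        match m, h1 with
        | 1, _ =>
          exact absurd ((czy_palindrom_iff (rrot l)).mpr (by simpa using h3)) hp
        | m + 2, _ =>
          exact (ih (rrot l) hne).mpr
            ⟨m + 1, by omega, by omega, by simpa [Function.iterate_succ_apply] using h3⟩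

lemma rrot_iterate (L : List Int) (m : Nat) :
    rrot^[m] L = L.rotate (m * (L.length - 1)) := by
  induction m with
  | zero => simp
  | succ m ih =>
    rw [Function.iterate_succ_apply', ih, rrot, List.length_rotate, List.rotate_rotate]
    congr 1
    ring

lemma A_iff (L : List Int) :
    czy_krecony_palindrom L = true ↔
      ∃ j, j < L.length ∧ (L.rotate j).reverse = L.rotate j := by
  rcases eq_or_ne L [] with rfl | hL
  · simp [czy_krecony_palindrom, dlugosc, aLoop]
  · have hn : 1 ≤ L.length := List.length_pos_of_ne_nil hL
    have htop : czy_krecony_palindrom L = aLoop L L.length := by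
      simp [czy_krecony_palindrom, dlugosc_eq]
    rw [htop, aLoop_iff L.length L hL]
    constructor
    · rintro ⟨m, h1, h2, h3⟩
      rw [rrot_iterate] at h3
      refine ⟨(m * (L.length - 1)) % L.length, Nat.mod_lt _ (by omega), ?_⟩
      rwa [List.rotate_mod]
    · rintro ⟨j, hj, hp⟩
      refine ⟨L.length - j, by omega, by omega, ?_⟩
      rw [rrot_iterate]
      have key : (L.length - j) * (L.length - 1) = j + (L.length - j - 1) * L.length := by
        zify [show j ≤ L.length by omega, show 1 ≤ L.length by omega,
          show 1 ≤ L.length - j by omega]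
        ring
      rw [key, ← List.rotate_mod, Nat.add_mul_mod_self_right, Nat.mod_eq_of_lt hj]
      exact hp

lemma window_eq (L : List Int) (k : Nat) (hk : k ≤ L.length) :
    ((L ++ L).drop k).take L.length = L.rotate k := by
  rw [List.drop_append, Nat.sub_eq_zero_of_le hk, List.drop_zero, List.take_append,
    List.take_of_length_le (by simp), List.length_drop,
    Nat.sub_sub_self hk, List.rotate_eq_drop_append_take hk]

lemma values_counter (L : List Int) :
    (PySem.Dict.counter L).values = (PySem.Set.ofList L).map (fun k => (L.count k : Int)) := by
  show (PySem.Dict.counter L).items.map (·.2) = _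
  rw [PySem.Dict.items_counter, List.map_map]
  rfl

lemma odd_eq_oddCount (L : List Int) :
    ((PySem.Dict.counter L).values.foldl
      (fun o c => if PySem.Int.mod c 2 == 1 then o + 1 else o) 0 : Int) = (oddCount L : Int) := by
  rw [PySem.List.foldl_count_if, values_counter, List.countP_map, oddCount]
  norm_num
  apply List.countP_congr
  intro k _
  simp only [Function.comp_apply]
  rw [show ((L.count k : Int)) % 2 = ((L.count k % 2 : Nat) : Int) from (Int.natCast_mod _ _).symm]
  rcases Nat.mod_two_eq_zero_or_one (L.count k) with h | h <;> simp [h]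

lemma B_iff (L : List Int) :
    czy_krecony_palindrom_alt L = true ↔
      oddCount L ≤ 1 ∧ ∃ j, j < L.length ∧ (L.rotate j).reverse = L.rotate j := by
  have hB : czy_krecony_palindrom_alt L =
      (if ((PySem.Dict.counter L).values.foldl
            (fun o c => if PySem.Int.mod c 2 == 1 then o + 1 else o) 0 : Int) > 1 then false
       else
        (PySem.List.pyRange 0 (L.length : Int) 1).any (fun i =>
          PySem.List.slice (L ++ L) (some i) (some (i + (L.length : Int))) ==
            (PySem.List.slice? (PySem.List.slice (L ++ L) (some i) (some (i + (L.length : Int)))) none none (-1)).getD [])) := by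
    rw [czy_krecony_palindrom_alt, PySem.Dict.foldl_insert_getD_add_one_eq_counter]
  rw [hB, odd_eq_oddCount]
  by_cases ho : oddCount L ≤ 1
  · rw [if_neg (by exact_mod_cast not_lt.mpr (by exact_mod_cast ho))]
    simp only [List.any_eq_true, ho, true_and]
    constructor
    · rintro ⟨i, hmem, hcond⟩
      obtain ⟨hi0, hin⟩ := PySem.List.mem_pyRange_one.mp hmem
      have hslice : PySem.List.slice (L ++ L) (some i) (some (i + L.length)) = L.rotate i.toNat := by
        rw [PySem.List.slice_toNat _ hi0 (by omega)]
        have : (i + (L.length : Int)).toNat - i.toNat = L.length := by omega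
        rw [this, window_eq L i.toNat (by omega)]
      rw [hslice, PySem.List.slice?_none_none_neg_one] at hcond
      simp only [Option.getD_some, beq_iff_eq] at hcond
      exact ⟨i.toNat, by omega, hcond.symm⟩
    · rintro ⟨j, hj, hp⟩
      refine ⟨(j : Int), PySem.List.mem_pyRange_one.mpr ⟨by omega, by exact_mod_cast hj⟩, ?_⟩
      have hslice : PySem.List.slice (L ++ L) (some (j : Int)) (some ((j : Int) + L.length)) = L.rotate j := by
        rw [PySem.List.slice_toNat _ (by omega) (by omega)]
        have : ((j : Int) + (L.length : Int)).toNat - (j : Int).toNat = L.length := by omega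
        rw [this]
        simpa using window_eq L j (by omega)
      rw [hslice, PySem.List.slice?_none_none_neg_one]
      simp [hp]
  · rw [if_pos (by exact_mod_cast lt_of_not_ge (by exact_mod_cast ho))]
    simp [ho]

lemma pal_card {p : List Int} (hp : p.Palindrome) :
    (p.toFinset.filter (fun k => decide (p.count k % 2 = 1))).card ≤ 1 := by
  induction hp with
  | nil => simp
  | singleton x => simpa using Finset.card_filter_le ({x} : Finset Int) _
  | cons_concat x hl ih =>
    rename_i l
    have hcnt : ∀ k : Int, (x :: (l ++ [x])).count k % 2 = l.count k % 2 := by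
      intro k
      by_cases hk : k = x <;>
        simp [List.count_cons, List.count_append, hk] <;> omega
    have hset : ((x :: (l ++ [x])).toFinset.filter
        (fun k => decide ((x :: (l ++ [x])).count k % 2 = 1))) =
        l.toFinset.filter (fun k => decide (l.count k % 2 = 1)) := by
      ext k
      simp only [Finset.mem_filter, List.mem_toFinset, decide_eq_true_eq, hcnt]
      constructor
      · rintro ⟨_, ho⟩
        have : 0 < l.count k := by omega
        exact ⟨List.count_pos_iff.mp this, ho⟩
      · rintro ⟨hm, ho⟩
        exact ⟨by simp [hm], ho⟩
    rw [hset]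
    exact ih

lemma oddCount_eq_card (L : List Int) :
    oddCount L = (L.toFinset.filter (fun k => decide (L.count k % 2 = 1))).card := by
  have hnd : (PySem.Set.ofList L).Nodup := PySem.Set.nodup_ofList L
  have hfin : (PySem.Set.ofList L).toFinset = L.toFinset := by
    ext k
    simp [List.mem_toFinset, PySem.Set.mem_ofList]
  rw [oddCount, List.countP_eq_length_filter,
    ← List.toFinset_card_of_nodup (hnd.filter _), List.toFinset_filter, hfin]

lemma pal_rotate_oddCount (L : List Int) (j : Nat)
    (hp : (L.rotate j).reverse = L.rotate j) : oddCount L ≤ 1 := by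
  have hperm : (L.rotate j).Perm L := List.rotate_perm L j
  have hcnt : ∀ k : Int, L.count k = (L.rotate j).count k := fun k => (hperm.count_eq k).symm
  have hfin : L.toFinset = (L.rotate j).toFinset := (List.toFinset_eq_of_perm _ _ hperm).symm
  rw [oddCount_eq_card, hfin]
  have : (L.rotate j).toFinset.filter (fun k => decide (L.count k % 2 = 1)) =
      (L.rotate j).toFinset.filter (fun k => decide ((L.rotate j).count k % 2 = 1)) := by
    apply Finset.filter_congr
    intro k _
    simp [hcnt k]
  rw [this]
  exact pal_card (List.Palindrome.iff_reverse_eq.mpr hp)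

-- ===== VERDICT (by name: the statement is the Claim_ definition above) =====
theorem czy_krecony_palindrom_spec : Claim_equal_czy_krecony_palindrom := by
  intro L _
  show czy_krecony_palindrom L = czy_krecony_palindrom_alt L
  rw [Bool.eq_iff_iff, A_iff, B_iff]
  constructor
  · rintro ⟨j, hj, hp⟩
    exact ⟨pal_rotate_oddCount L j hp, j, hj, hp⟩
  · exact fun h => h.2
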